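-- pv_equiv track=rewrite | github.com/CrimsonTheLegoBuilder/MyBaekjoonSolve | hw/test230731/problem11.py | get_row_col_maxsum
-- ===== SOURCE A (Python) =====
-- def get_row_col_maxsum(matrix):
--     length_r = 0                # 행의 크기
--     length_c = 0                # 열의 크기
--     flag = 0                    # 최대값이 나온 줄이 행인지 열인지 판단
--     ans = -int(10e10)           # 설마 이거보다 작은 수가 최대값이겠나
--     for _ in matrix:            # 행의 크기를 구해보자
--         length_r += 1
--     for _ in matrix[0]:         # 열의 크기를 구해보자.
--         length_c += 1           # 직사각행렬임이 보장된다고 했다. 0번째만 보면 되겠지.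
--
--     for j in range(length_c):      # 특정 열의 합이 가장 큰 지부터 살펴보자.
--         total = 0                  # 매순간 합계를 초기화
--         for i in range(length_r):
--             total += matrix[i][j]  # 특정 행의 모든 j번째 숫자를 더하기
--         if total > ans:            # 만일 다 더한 수가 이전 합보다 크다면?
--             ans = total            # 이 수가 제일 크네
--             flag = 1               # 그리고 이 합계는 열에서 나온거야
--
--     for i in range(length_r):      # 이번에는 특정 행의 합을 보자
--         total = 0
--         for j in range(length_c):
--             total += matrix[i][j]
--         if total > ans:
--             ans = total
--             flag = 0               # 이 합계는 행에서 나왔음.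
--
--     if flag:
--         return 'col', ans
--     else:
--         return 'row', ans
-- ===== SOURCE B (Python) =====
-- NEG_INF = -10 ** 11   # same lower bound the module uses elsewhere (-int(10e10))
--
-- def get_row_col_maxsum(matrix):
--     c = len(matrix[0])          # rectangular matrix guaranteed: only the first c entries of a row count
--     col_sums = [0] * c
--     row_sums = []
--     for row in matrix:          # one accumulation pass builds both sum tables
--         col_sums = [s + v for s, v in zip(col_sums, row)]
--         row_sums.append(sum(row[:c]))
--     flag, ans = 'row', NEG_INF
--     for s in col_sums:          # scan columns first, so a column wins ties
--         if ans < s: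
--             flag, ans = 'col', s
--     for s in row_sums:
--         if ans < s:
--             flag, ans = 'row', s
--     return flag, ans
-- ===== Notes on version B (the rewrite author's own statement) =====
-- stated objective: alternative
-- what changed: B builds row_sums and col_sums tables in one accumulation pass over the matrix (zip-adding columns, appending row sums) and then linearly scans the two tables for the strict running maximum, instead of A's two directional nested summation loops that recompute each line sum in place.
import Mathlib
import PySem

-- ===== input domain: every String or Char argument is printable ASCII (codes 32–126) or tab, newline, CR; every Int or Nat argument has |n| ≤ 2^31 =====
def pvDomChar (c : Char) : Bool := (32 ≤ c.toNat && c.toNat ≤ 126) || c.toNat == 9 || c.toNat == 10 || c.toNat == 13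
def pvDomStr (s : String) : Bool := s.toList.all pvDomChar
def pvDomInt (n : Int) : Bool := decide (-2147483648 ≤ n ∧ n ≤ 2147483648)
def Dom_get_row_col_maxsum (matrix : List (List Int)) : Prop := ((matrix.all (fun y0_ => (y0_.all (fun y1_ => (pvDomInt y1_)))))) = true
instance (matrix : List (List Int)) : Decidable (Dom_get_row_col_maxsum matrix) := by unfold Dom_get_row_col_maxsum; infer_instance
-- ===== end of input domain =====

-- B builds the row/column sum tables in one accumulation pass and then scans the two tables
-- (columns first) for the strict running maximum — an alternative decomposition of A's two
-- directional nested summation loops, with the same NEG_INF scan initializer and asymptotic cost.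

-- ===== PORT A =====
def get_row_col_maxsum (matrix : List (List Int)) : String × Int :=
  -- flag = 0/1 as in Python; the loop states are pairs (ans, flag)
  let length_r : Int := matrix.foldl (fun n _ => n + 1) 0
  -- matrix[0] raises IndexError on []: excluded by Pre_; outside Pre_ the .getD [] is junk
  let length_c : Int := ((PySem.List.pyGet? matrix 0).getD []).foldl (fun n _ => n + 1) 0
  -- ans = -int(10e10) = -100000000000
  let st1 : Int × Int := (PySem.List.pyRange 0 length_c 1).foldl
    (fun (st : Int × Int) j =>
      let total : Int := (PySem.List.pyRange 0 length_r 1).foldl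
        (fun total i => total + PySem.List.pyGetD (PySem.List.pyGetD matrix i []) j 0) 0
      if st.1 < total then (total, 1) else st) (-100000000000, 0)
  let st2 : Int × Int := (PySem.List.pyRange 0 length_r 1).foldl
    (fun (st : Int × Int) i =>
      let total : Int := (PySem.List.pyRange 0 length_c 1).foldl
        (fun total j => total + PySem.List.pyGetD (PySem.List.pyGetD matrix i []) j 0) 0
      if st.1 < total then (total, 0) else st) st1
  if st2.2 ≠ 0 then ("col", st2.1) else ("row", st2.1)

-- ===== PORT B =====
def get_row_col_maxsum_alt (matrix : List (List Int)) : String × Int :=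
  let c : Nat := ((PySem.List.pyGet? matrix 0).getD []).length
  -- one pass building both sum tables
  let sums : List Int × List Int := matrix.foldl
    (fun (st : List Int × List Int) row =>
      (List.zipWith (fun s v => s + v) st.1 row,
       st.2 ++ [(PySem.List.slice row none (some (c : Int))).foldl (fun t v => t + v) 0]))
    (List.replicate c (0 : Int), [])
  -- scan col_sums then row_sums; the scan state is (flag, ans); NEG_INF = -10**11
  let st1 : String × Int := sums.1.foldl
    (fun st s => if st.2 < s then ("col", s) else st) ("row", -100000000000)
  let st2 : String × Int := sums.2.foldl
    (fun st s => if st.2 < s then ("row", s) else st) st1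
  st2

-- ===== PRECONDITION & SPEC =====
-- Pre_ excludes exactly the inputs where A raises IndexError: the empty matrix (matrix[0])
-- and matrices with a row shorter than the first row (matrix[i][j]).
def Pre_get_row_col_maxsum (matrix : List (List Int)) : Prop :=
  matrix ≠ [] ∧ ∀ row ∈ matrix, (matrix.headD []).length ≤ row.length
instance (matrix : List (List Int)) : Decidable (Pre_get_row_col_maxsum matrix) := by
  unfold Pre_get_row_col_maxsum; infer_instance
def pvWitness_get_row_col_maxsum : List (List Int) := [[1, 2], [3, 4]]

def Spec_get_row_col_maxsum (matrix : List (List Int)) (out : String × Int) : Prop :=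
  out = get_row_col_maxsum_alt matrix
instance (matrix : List (List Int)) (out : String × Int) : Decidable (Spec_get_row_col_maxsum matrix out) := by
  unfold Spec_get_row_col_maxsum; infer_instance

-- ===== CLAIM (what is proved, stated in full; the proofs are below) =====
def Claim_equal_get_row_col_maxsum : Prop := ∀ (matrix : List (List Int)), Dom_get_row_col_maxsum matrix → Pre_get_row_col_maxsum matrix → Spec_get_row_col_maxsum matrix (get_row_col_maxsum matrix)

-- ===== LEMMAS AND PROOFS =====

-- the row/column sums of the input (first-row-width columns; rows are read up to that width)
def pvRowSums (matrix : List (List Int)) : List Int :=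
  matrix.map (fun row => (row.take (matrix.headD []).length).sum)
def pvColSums (matrix : List (List Int)) : List Int :=
  (List.range (matrix.headD []).length).map (fun j => (matrix.map (fun row => row.getD j 0)).sum)

theorem pv_foldl_count {α : Type} (l : List α) (n : Int) :
    l.foldl (fun n _ => n + 1) n = n + l.length := by
  induction l generalizing n with
  | nil => simp
  | cons x t ih => simp [List.foldl, ih]; ring

theorem pv_pyGet0 {α : Type} (m : List α) (d : α) :
    (PySem.List.pyGet? m 0).getD d = m.headD d := by
  cases m <;> simp [PySem.List.pyGet?, PySem.List.pyIdx?]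

-- A's strict-max update loop: the answer is a running max, the flag records whether it moved
theorem pv_scanA_char (L : List Int) (tag : Int) (st : Int × Int) :
    L.foldl (fun st s => if st.1 < s then (s, tag) else st) st =
      (L.foldl max st.1, if st.1 < L.foldl max st.1 then tag else st.2) := by
  induction L generalizing st with
  | nil => simp
  | cons s t ih =>
    simp only [List.foldl]
    by_cases hs : st.1 < s
    · rw [if_pos hs, ih]
      have h1 : max st.1 s = s := by omega
      have h2 : s ≤ t.foldl max s := (PySem.List.le_foldl_max t s).1
      simp only [h1]
      have : st.1 < t.foldl max s := by omega
      simp [this]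
    · rw [if_neg hs, ih]
      have h1 : max st.1 s = st.1 := by omega
      simp [h1]

-- B's strict-max update loop (state is (flag, ans)): same running max, generic flag type
theorem pv_scanB_char {τ : Type} (L : List Int) (tag f0 : τ) (a0 : Int) :
    L.foldl (fun (st : τ × Int) s => if st.2 < s then (tag, s) else st) (f0, a0) =
      ((if a0 < L.foldl max a0 then tag else f0), L.foldl max a0) := by
  induction L generalizing f0 a0 with
  | nil => simp
  | cons s t ih =>
    simp only [List.foldl]
    by_cases hs : a0 < s
    · rw [if_pos hs, ih]
      have h1 : max a0 s = s := by omega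
      have h2 : s ≤ t.foldl max s := (PySem.List.le_foldl_max t s).1
      simp only [h1]
      have : a0 < t.foldl max s := by omega
      simp [this]
    · rw [if_neg hs, ih]
      have h1 : max a0 s = a0 := by omega
      simp [h1]

theorem pv_map_range_getD_take {c : Nat} (row : List Int) (h : c ≤ row.length) :
    (List.range c).map (fun k => row.getD k 0) = row.take c := by
  apply List.ext_getElem
  · simp [h]
  · intro i h1 h2
    have hi : i < row.length := by simp at h2; omega
    simp_all [List.getD_eq_getElem?_getD]

theorem A_inner (matrix : List (List Int)) (j : Int) :
    (PySem.List.pyRange 0 ((matrix.length : Int)) 1).foldl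
      (fun total i => total + PySem.List.pyGetD (PySem.List.pyGetD matrix i []) j 0) 0 =
    (matrix.map (fun row => PySem.List.pyGetD row j 0)).sum := by
  rw [PySem.List.foldl_pyRange_zero_pyGetD' matrix []
        (fun total row => total + PySem.List.pyGetD row j 0) 0]
  rw [PySem.List.foldl_add]
  simp

theorem A_col_loop (matrix : List (List Int)) (st0 : Int × Int) :
    (PySem.List.pyRange 0 (((matrix.headD [] : List Int).length : Int)) 1).foldl
      (fun (st : Int × Int) j =>
        let total : Int := (PySem.List.pyRange 0 ((matrix.length : Int)) 1).foldl
          (fun total i => total + PySem.List.pyGetD (PySem.List.pyGetD matrix i []) j 0) 0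
        if st.1 < total then (total, 1) else st) st0 =
    (pvColSums matrix).foldl (fun st s => if st.1 < s then (s, 1) else st) st0 := by
  simp only [A_inner]
  rw [PySem.List.pyRange_zero_nat, List.foldl_map]
  unfold pvColSums
  rw [List.foldl_map]
  apply PySem.List.foldl_congr_mem
  intro st k hk
  simp [PySem.List.pyGetD_natCast]

theorem A_row_loop (matrix : List (List Int))
    (hrows : ∀ row ∈ matrix, (matrix.headD []).length ≤ row.length) (st0 : Int × Int) :
    (PySem.List.pyRange 0 ((matrix.length : Int)) 1).foldl
      (fun (st : Int × Int) i =>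
        let total : Int := (PySem.List.pyRange 0 (((matrix.headD [] : List Int).length : Int)) 1).foldl
          (fun total j => total + PySem.List.pyGetD (PySem.List.pyGetD matrix i []) j 0) 0
        if st.1 < total then (total, 0) else st) st0 =
    (pvRowSums matrix).foldl (fun st s => if st.1 < s then (s, 0) else st) st0 := by
  rw [PySem.List.foldl_pyRange_zero_pyGetD' matrix []
        (fun (st : Int × Int) row =>
          let total : Int := (PySem.List.pyRange 0 (((matrix.headD [] : List Int).length : Int)) 1).foldl
            (fun total j => total + PySem.List.pyGetD row j 0) 0
          if st.1 < total then (total, 0) else st) st0]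
  unfold pvRowSums
  rw [List.foldl_map]
  apply PySem.List.foldl_congr_mem
  intro st row hrow
  have hinner : (PySem.List.pyRange 0 (((matrix.headD [] : List Int).length : Int)) 1).foldl
      (fun total j => total + PySem.List.pyGetD row j 0) 0 =
      (row.take (matrix.headD []).length).sum := by
    rw [PySem.List.pyRange_zero_nat, List.foldl_map]
    simp only [PySem.List.pyGetD_natCast]
    rw [PySem.List.foldl_add]
    rw [pv_map_range_getD_take row (hrows row hrow)]
    simp
  simp only [hinner]

-- A's result, characterised over the two sum tables
theorem A_char (matrix : List (List Int))
    (hrows : ∀ row ∈ matrix, (matrix.headD []).length ≤ row.length) :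
    get_row_col_maxsum matrix =
      ((if (pvColSums matrix).foldl max (-100000000000) <
            (pvRowSums matrix).foldl max ((pvColSums matrix).foldl max (-100000000000)) then "row"
        else if (-100000000000 : Int) < (pvColSums matrix).foldl max (-100000000000) then "col"
        else "row"),
       (pvRowSums matrix).foldl max ((pvColSums matrix).foldl max (-100000000000))) := by
  unfold get_row_col_maxsum
  simp only [pv_foldl_count, pv_pyGet0, zero_add]
  rw [A_col_loop, A_row_loop matrix hrows]
  rw [pv_scanA_char, pv_scanA_char]
  simp only []
  set a1 := (pvColSums matrix).foldl max (-100000000000) with ha1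
  set a2 := (pvRowSums matrix).foldl max a1 with ha2
  have hle : a1 ≤ a2 := (PySem.List.le_foldl_max (pvRowSums matrix) a1).1
  by_cases h12 : a1 < a2
  · simp [h12]
  · have heq : a1 = a2 := by omega
    simp [heq]
    split_ifs <;> rfl

theorem pv_colfold (matrix : List (List Int)) (c : Nat) (acc : List Int)
    (hacc : acc.length = c) (hrows : ∀ row ∈ matrix, c ≤ row.length) :
    matrix.foldl (fun cs row => List.zipWith (fun s v => s + v) cs row) acc =
      (List.range c).map (fun j => acc.getD j 0 + (matrix.map (fun row => row.getD j 0)).sum) := by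
  induction matrix generalizing acc with
  | nil =>
    simp only [List.foldl, List.map_nil, List.sum_nil, add_zero]
    subst hacc
    apply List.ext_getElem
    · simp
    · intro i h1 h2
      simp_all [List.getD_eq_getElem?_getD]
  | cons row t ih =>
    have hr : c ≤ row.length := hrows row (by simp)
    have hlen : (List.zipWith (fun s v => s + v) acc row).length = c := by
      simp [hacc]; omega
    simp only [List.foldl]
    rw [ih _ hlen (fun r hr' => hrows r (by simp [hr']))]
    apply List.map_congr_left
    intro j hj
    rw [List.mem_range] at hj
    have h1 : j < acc.length := by omega
    have h2 : j < row.length := by omega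
    have hz : (List.zipWith (fun s v => s + v) acc row).getD j 0 = acc.getD j 0 + row.getD j 0 := by
      simp [List.getD_eq_getElem?_getD, h1, h2]
    rw [hz]
    simp [add_assoc]

-- B's accumulation pass produces exactly the two sum tables
theorem B_sums (matrix : List (List Int)) (c : Nat) (hc : c = (matrix.headD []).length)
    (hrows : ∀ row ∈ matrix, (matrix.headD []).length ≤ row.length) :
    matrix.foldl
      (fun (st : List Int × List Int) row =>
        (List.zipWith (fun s v => s + v) st.1 row,
         st.2 ++ [(PySem.List.slice row none (some (c : Int))).foldl (fun t v => t + v) 0]))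
      (List.replicate c (0 : Int), []) = (pvColSums matrix, pvRowSums matrix) := by
  rw [PySem.List.foldl_prod_mk
        (fun cs row => List.zipWith (fun s v => s + v) cs row)
        (fun (rs : List Int) row => rs ++ [(PySem.List.slice row none (some (c : Int))).foldl (fun t v => t + v) 0])
        matrix (List.replicate c (0 : Int)) []]
  simp only [Prod.mk.injEq]
  refine ⟨?_, ?_⟩
  · rw [pv_colfold matrix c _ (by simp) (by rw [hc] at *; exact hrows)]
    unfold pvColSums
    rw [hc]
    apply List.map_congr_left
    intro j hj
    rw [List.mem_range] at hj
    simp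
  · rw [PySem.List.foldl_append_singleton_eq_map]
    unfold pvRowSums
    simp only [List.nil_append]
    apply List.map_congr_left
    intro row hrow
    rw [PySem.List.slice_to_natCast]
    rw [PySem.List.foldl_add (row.take c) (fun v => v) 0]
    simp [hc]

-- B's result, characterised over the same two sum tables: the very expression A_char gives
theorem B_char (matrix : List (List Int))
    (hrows : ∀ row ∈ matrix, (matrix.headD []).length ≤ row.length) :
    get_row_col_maxsum_alt matrix =
      ((if (pvColSums matrix).foldl max (-100000000000) <
            (pvRowSums matrix).foldl max ((pvColSums matrix).foldl max (-100000000000)) then "row"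
        else if (-100000000000 : Int) < (pvColSums matrix).foldl max (-100000000000) then "col"
        else "row"),
       (pvRowSums matrix).foldl max ((pvColSums matrix).foldl max (-100000000000))) := by
  unfold get_row_col_maxsum_alt
  simp only [pv_pyGet0]
  rw [B_sums matrix _ rfl hrows]
  simp only []
  rw [pv_scanB_char, pv_scanB_char]

-- ===== VERDICT (by name: the statement is the Claim_ definition above) =====
theorem get_row_col_maxsum_spec : Claim_equal_get_row_col_maxsum := by
  intro matrix _ hpre
  obtain ⟨hne, hrows⟩ := hpre
  unfold Spec_get_row_col_maxsum
  rw [A_char matrix hrows, B_char matrix hrows]
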